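-- pv_equiv track=rewrite | github.com/MikolasJanota/llm2smt | scripts/_model_check.py | extract_top_level_sexps
-- ===== SOURCE A (Python) =====
-- def extract_top_level_sexps(text: str) -> list[str]:
--     """Return all top-level balanced S-expressions in *text* (handles ; comments)."""
--     result: list[str] = []
--     depth = 0
--     start = -1
--     in_str = False
--     i = 0
--     while i < len(text):
--         c = text[i]
--         if in_str:
--             if c == '\\':
--                 i += 2
--                 continue
--             if c == '"':
--                 in_str = False
--         elif c == '"':
--             in_str = True
--             if depth == 0:
--                 start = i
--         elif c == ';':
--             while i < len(text) and text[i] != '\n':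
--                 i += 1
--             continue
--         elif c == '(':
--             if depth == 0:
--                 start = i
--             depth += 1
--         elif c == ')':
--             depth -= 1
--             if depth == 0 and start >= 0:
--                 result.append(text[start:i + 1])
--                 start = -1
--         i += 1
--     return result
-- ===== SOURCE B (Python) =====
-- def extract_top_level_sexps(text: str) -> list[str]:
--     """Two-pass version: lex paren tokens (outside strings/comments), then match with a depth counter."""
--     n = len(text)
--     # pass 1: token list of (char, index) for every '(' / ')' outside strings and ';' comments
--     tokens = []
--     i = 0
--     in_str = False
--     while i < n:
--         c = text[i]
--         if in_str:
--             if c == '\\':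
--                 i += 2
--                 continue
--             if c == '"':
--                 in_str = False
--             i += 1
--         elif c == '"':
--             in_str = True
--             i += 1
--         elif c == ';':
--             while i < n and text[i] != '\n':
--                 i += 1
--         elif c in '()':
--             tokens.append((c, i))
--             i += 1
--         else:
--             i += 1
--     # pass 2: match tokens with a signed depth counter
--     result = []
--     depth = 0
--     start = -1
--     for c, idx in tokens:
--         if c == '(':
--             if depth == 0:
--                 start = idx
--             depth += 1
--         else:
--             depth -= 1
--             if depth == 0 and start >= 0:
--                 result.append(text[start:idx + 1])
--                 start = -1
--     return result
-- ===== Notes on version B (the rewrite author's own statement) =====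
-- stated objective: alternative
-- what changed: Replaces A's single state machine (depth/start/result all updated while scanning characters) by two passes: a lexer that emits only the paren tokens (char, index) lying outside strings and ';' comments, then a simple depth-counting matcher over that token list that slices the original text by the recorded offsets.
import Mathlib
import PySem

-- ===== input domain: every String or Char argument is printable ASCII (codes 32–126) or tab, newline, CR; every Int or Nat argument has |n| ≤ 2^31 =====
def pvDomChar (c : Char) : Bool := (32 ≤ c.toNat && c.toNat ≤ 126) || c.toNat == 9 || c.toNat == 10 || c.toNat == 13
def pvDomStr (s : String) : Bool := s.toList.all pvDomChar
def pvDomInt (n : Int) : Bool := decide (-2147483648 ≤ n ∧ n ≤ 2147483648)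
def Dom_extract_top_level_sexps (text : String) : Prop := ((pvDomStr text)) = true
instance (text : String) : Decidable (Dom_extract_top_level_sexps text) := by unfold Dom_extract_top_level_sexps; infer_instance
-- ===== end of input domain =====

-- B reorganizes A's one state machine into a lexer pass (paren tokens with offsets) plus a depth-counting matcher; same output, proved equal.

-- ===== PORT A =====
-- the inner `while i < len(text) and text[i] != '\n': i += 1` (this loop is identical in Source A and Source B)
def pvSkipComment (cs : List Char) (i : Nat) : Nat :=
  if h : i < cs.length then
    if cs[i] ≠ '\n' then pvSkipComment cs (i + 1) else i
  else i
termination_by cs.length - i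

theorem pvSkipComment_ge (cs : List Char) (i : Nat) : i ≤ pvSkipComment cs i := by
  unfold pvSkipComment
  split
  · split
    · exact le_trans (Nat.le_succ i) (pvSkipComment_ge cs (i + 1))
    · exact le_refl i
  · exact le_refl i
termination_by cs.length - i

theorem pvSkipComment_gt (cs : List Char) (i : Nat) (h : i < cs.length) (hc : cs[i] ≠ '\n') :
    i < pvSkipComment cs i := by
  unfold pvSkipComment
  simp only [h, hc, dif_pos, if_pos, ne_eq, not_false_eq_true]
  exact lt_of_lt_of_le (Nat.lt_succ_self i) (pvSkipComment_ge cs (i + 1))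

-- A's while loop, step for step (c = text[i] is inlined as cs[i])
def pvALoop (cs : List Char) (i : Nat) (depth start : Int) (instr : Bool) (acc : List String) :
    List String :=
  if h : i < cs.length then
    if instr then
      if cs[i] = '\\' then pvALoop cs (i + 2) depth start instr acc
      else if cs[i] = '"' then pvALoop cs (i + 1) depth start false acc
      else pvALoop cs (i + 1) depth start instr acc
    else if cs[i] = '"' then
      pvALoop cs (i + 1) depth (if depth = 0 then (i : Int) else start) true acc
    else if cs[i] = ';' then
      pvALoop cs (pvSkipComment cs i) depth start instr acc
    else if cs[i] = '(' then
      pvALoop cs (i + 1) (depth + 1) (if depth = 0 then (i : Int) else start) instr acc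
    else if cs[i] = ')' then
      if depth - 1 = 0 ∧ 0 ≤ start then
        pvALoop cs (i + 1) (depth - 1) (-1) instr
          (acc ++ [String.ofList (PySem.List.slice cs (some start) (some ((i : Int) + 1)))])
      else pvALoop cs (i + 1) (depth - 1) start instr acc
    else pvALoop cs (i + 1) depth start instr acc
  else acc
termination_by cs.length - i
decreasing_by
  all_goals try omega
  all_goals
    rename_i hsemi
    have hne : cs[i] ≠ '\n' := by rw [show cs[i] = ';' from hsemi]; decide
    have := pvSkipComment_gt cs i h hne
    omega

def extract_top_level_sexps (text : String) : List String :=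
  pvALoop text.toList 0 0 (-1) false []

-- ===== PORT B =====
-- pass 1 of Source B: tokens (c, i) for parens outside strings and comments
def pvLex (cs : List Char) (i : Nat) (instr : Bool) : List (Char × Nat) :=
  if h : i < cs.length then
    if instr then
      if cs[i] = '\\' then pvLex cs (i + 2) instr
      else if cs[i] = '"' then pvLex cs (i + 1) false
      else pvLex cs (i + 1) instr
    else if cs[i] = '"' then pvLex cs (i + 1) true
    else if cs[i] = ';' then pvLex cs (pvSkipComment cs i) instr
    else if cs[i] = '(' ∨ cs[i] = ')' then (cs[i], i) :: pvLex cs (i + 1) instr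
    else pvLex cs (i + 1) instr
  else []
termination_by cs.length - i
decreasing_by
  all_goals try omega
  all_goals
    rename_i hsemi
    have hne : cs[i] ≠ '\n' := by rw [show cs[i] = ';' from hsemi]; decide
    have := pvSkipComment_gt cs i h hne
    omega

-- pass 2 of Source B: depth-counting matcher over the token list
def pvMatch (cs : List Char) : List (Char × Nat) → Int → Int → List String → List String
  | [], _, _, acc => acc
  | (c, idx) :: rest, depth, start, acc =>
    if c = '(' then
      pvMatch cs rest (depth + 1) (if depth = 0 then (idx : Int) else start) acc
    else
      if depth - 1 = 0 ∧ 0 ≤ start then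
        pvMatch cs rest (depth - 1) (-1)
          (acc ++ [String.ofList (PySem.List.slice cs (some start) (some ((idx : Int) + 1)))])
      else pvMatch cs rest (depth - 1) start acc

def extract_top_level_sexps_alt (text : String) : List String :=
  pvMatch text.toList (pvLex text.toList 0 false) 0 (-1) []

-- ===== PRECONDITION & SPEC =====
def Spec_extract_top_level_sexps (text : String) (out : List String) : Prop := out = extract_top_level_sexps_alt text
instance (text : String) (out : List String) : Decidable (Spec_extract_top_level_sexps text out) := by unfold Spec_extract_top_level_sexps; infer_instance

-- ===== CLAIM (what is proved, stated in full; the proofs are below) =====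
def Claim_equal_extract_top_level_sexps : Prop := ∀ (text : String), Dom_extract_top_level_sexps text → Spec_extract_top_level_sexps text (extract_top_level_sexps text)

-- ===== LEMMAS AND PROOFS =====

-- at non-positive depth the matcher ignores `start` (a '(' at depth 0 overwrites it before any append)
theorem pvMatch_start_irrel (cs : List Char) (toks : List (Char × Nat)) :
    ∀ depth s₁ s₂ acc, depth ≤ 0 →
      pvMatch cs toks depth s₁ acc = pvMatch cs toks depth s₂ acc := by
  induction toks with
  | nil => intro depth s₁ s₂ acc _; rfl
  | cons t rest ih =>
    intro depth s₁ s₂ acc hd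
    obtain ⟨c, idx⟩ := t
    simp only [pvMatch]
    split
    · by_cases h0 : depth = 0
      · simp [h0]
      · simp only [h0, if_neg, not_false_eq_true]
        exact ih (depth + 1) s₁ s₂ acc (by omega)
    · have h1 : ¬ (depth - 1 = 0 ∧ 0 ≤ s₁) := by omega
      have h2 : ¬ (depth - 1 = 0 ∧ 0 ≤ s₂) := by omega
      simp only [h1, h2, if_neg, not_false_eq_true]
      exact ih (depth - 1) s₁ s₂ acc (by omega)

-- simulation: A's loop from any state equals B's matcher run on the tokens lexed from the same position
theorem pvSim (cs : List Char) :
    ∀ (n i : Nat) (depth start : Int) (instr : Bool) (acc : List String),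
      cs.length - i ≤ n →
      pvALoop cs i depth start instr acc = pvMatch cs (pvLex cs i instr) depth start acc := by
  intro n
  induction n with
  | zero =>
    intro i depth start instr acc hle
    have h : ¬ i < cs.length := by omega
    rw [pvALoop, pvLex]
    simp only [h, dif_neg, not_false_eq_true]
    rfl
  | succ n ih =>
    intro i depth start instr acc hle
    rw [pvALoop, pvLex]
    by_cases h : i < cs.length
    · simp only [h, dif_pos]
      cases instr with
      | true =>
        simp only [if_true]
        by_cases h1 : cs[i] = '\\'
        · simp only [h1, if_pos]; exact ih (i + 2) depth start true acc (by omega)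
        · simp only [h1, if_neg, not_false_eq_true]
          by_cases h2 : cs[i] = '"'
          · simp only [h2, if_pos]; exact ih (i + 1) depth start false acc (by omega)
          · simp only [h2, if_neg, not_false_eq_true]
            exact ih (i + 1) depth start true acc (by omega)
      | false =>
        simp only [Bool.false_eq_true, if_false]
        by_cases h2 : cs[i] = '"'
        · -- A may set start here (depth = 0); no token is emitted, and at depth ≤ 0 start is irrelevant
          simp only [h2, if_pos]
          rw [ih (i + 1) depth _ true acc (by omega)]
          by_cases h0 : depth = 0
          · simp only [h0, if_pos]
            exact pvMatch_start_irrel cs _ 0 (↑i) start acc (by omega)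
          · simp only [h0, if_neg, not_false_eq_true]
        · simp only [h2, if_neg, not_false_eq_true]
          by_cases h3 : cs[i] = ';'
          · simp only [h3, if_pos]
            have hne : cs[i] ≠ '\n' := by rw [h3]; decide
            have := pvSkipComment_gt cs i h hne
            exact ih (pvSkipComment cs i) depth start false acc (by omega)
          · simp only [h3, if_neg, not_false_eq_true]
            by_cases h4 : cs[i] = '('
            · simp only [h4, if_pos, true_or]
              rw [pvMatch]
              simp only [if_pos]
              exact ih (i + 1) (depth + 1) _ false acc (by omega)
            · simp only [h4, if_neg, not_false_eq_true, false_or]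
              by_cases h5 : cs[i] = ')'
              · simp only [h5, if_pos]
                rw [pvMatch]
                have hnp : ¬ (')' = '(') := by decide
                simp only [hnp, if_neg, not_false_eq_true]
                by_cases hc : depth - 1 = 0 ∧ 0 ≤ start
                · simp only [if_pos hc]
                  exact ih (i + 1) (depth - 1) (-1) false _ (by omega)
                · simp only [if_neg hc]
                  exact ih (i + 1) (depth - 1) start false acc (by omega)
              · simp only [h5, if_neg, not_false_eq_true]
                exact ih (i + 1) depth start false acc (by omega)
    · simp only [h, dif_neg, not_false_eq_true]
      rfl

-- ===== VERDICT (by name: the statement is the Claim_ definition above) =====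
theorem extract_top_level_sexps_spec : Claim_equal_extract_top_level_sexps := by
  intro text _
  unfold Spec_extract_top_level_sexps extract_top_level_sexps extract_top_level_sexps_alt
  exact pvSim text.toList text.toList.length 0 0 (-1) false [] (by omega)
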